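-- pv_equiv track=rewrite | github.com/fkulic/advent-of-code | 2025/day3.py | part_one
-- ===== SOURCE A (Python) =====
-- def part_one(banks: list[list[int]]) -> int:
--     total_joltage = 0
--     for bank in banks:
--         max_not_last = max(bank[:-1])
--         max_i = bank.index(max_not_last)
--         max_after_i = max(bank[max_i + 1 :])
--         total_joltage += max_not_last * 10 + max_after_i
--     return total_joltage
-- ===== SOURCE B (Python) =====
-- def part_one(banks: list[list[int]]) -> int:
--     # One pass per bank: running prefix max (first occurrence) and max of what follows it.
--     total_joltage = 0
--     for bank in banks:
--         cur_max = bank[0]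
--         suffix_max = None
--         for x in bank[1:-1]:
--             if x > cur_max:
--                 cur_max = x
--                 suffix_max = None
--             else:
--                 suffix_max = x if suffix_max is None else max(suffix_max, x)
--         last = bank[-1]
--         suffix_max = last if suffix_max is None else max(suffix_max, last)
--         total_joltage += cur_max * 10 + suffix_max
--     return total_joltage
-- ===== Notes on version B (the rewrite author's own statement) =====
-- stated objective: alternative
-- what changed: Replaces the three scans per bank (max of bank[:-1], bank.index, max of the tail) by a single left-to-right pass that keeps the running prefix max (first occurrence, via strict >) and the max of the elements after it.
import Mathlib
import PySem

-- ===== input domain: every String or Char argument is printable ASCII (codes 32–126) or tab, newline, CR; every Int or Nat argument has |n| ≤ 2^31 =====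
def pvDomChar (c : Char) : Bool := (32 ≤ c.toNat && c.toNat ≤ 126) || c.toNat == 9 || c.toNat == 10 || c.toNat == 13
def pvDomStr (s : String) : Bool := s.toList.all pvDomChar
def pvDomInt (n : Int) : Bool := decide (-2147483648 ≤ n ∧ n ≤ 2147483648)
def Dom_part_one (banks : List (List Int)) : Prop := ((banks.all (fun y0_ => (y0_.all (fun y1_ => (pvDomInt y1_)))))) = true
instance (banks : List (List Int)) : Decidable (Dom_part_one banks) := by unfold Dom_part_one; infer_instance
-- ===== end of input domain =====

-- B: a single left-to-right pass per bank (running prefix max + max after it) instead of A's three scans; alternative decomposition, same cost.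

-- ===== PORT A =====
def part_one (banks : List (List Int)) : Int :=
  banks.foldl (fun total bank =>
    match PySem.List.max? (PySem.List.slice bank none (some (-1))) (fun y => y) with
    | none => total  -- unreachable under Pre_ (Python: ValueError)
    | some m =>
      match PySem.List.index? bank m with
      | none => total  -- unreachable: m ∈ bank
      | some i =>
        match PySem.List.max? (PySem.List.slice bank (some ((i : Int) + 1)) none) (fun y => y) with
        | none => total  -- unreachable under Pre_
        | some a => total + m * 10 + a) 0

-- ===== PORT B =====
-- 'suffix_max = x if suffix_max is None else max(suffix_max, x)'
def pvComb (suf : Option Int) (x : Int) : Int :=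
  match suf with
  | none => x
  | some s => max s x

-- the inner 'for x in bank[1:-1]' loop of Source B
def pvScan (l : List Int) (cur : Int) (suf : Option Int) : Int × Option Int :=
  match l with
  | [] => (cur, suf)
  | x :: rest => if cur < x then pvScan rest x none else pvScan rest cur (some (pvComb suf x))

def part_one_alt (banks : List (List Int)) : Int :=
  banks.foldl (fun total bank =>
    match PySem.List.pyGet? bank 0, PySem.List.pyGet? bank (-1) with
    | some c0, some z =>
      let p := pvScan (PySem.List.slice bank (some 1) (some (-1))) c0 none
      total + p.1 * 10 + pvComb p.2 z
    | _, _ => total) 0  -- unreachable under Pre_ (Python: IndexError)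

-- ===== PRECONDITION & SPEC =====
-- Pre_: A raises ValueError (max of an empty slice) whenever some bank has fewer than two elements.
def Pre_part_one (banks : List (List Int)) : Prop := ∀ bank ∈ banks, 2 ≤ bank.length
instance (banks : List (List Int)) : Decidable (Pre_part_one banks) := by unfold Pre_part_one; infer_instance

def pvWitness_part_one : List (List Int) := [[3, 1, 4, 1], [5, 9, 2]]

def Spec_part_one (banks : List (List Int)) (out : Int) : Prop := out = part_one_alt banks
instance (banks : List (List Int)) (out : Int) : Decidable (Spec_part_one banks out) := by unfold Spec_part_one; infer_instance

-- ===== CLAIM (what is proved, stated in full; the proofs are below) =====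
def Claim_equal_part_one : Prop := ∀ (banks : List (List Int)), Dom_part_one banks → Pre_part_one banks → Spec_part_one banks (part_one banks)

-- ===== LEMMAS AND PROOFS =====

-- fold of pvComb over a list, as an Option accumulator
def pvCombFold (suf : Option Int) (l : List Int) : Option Int :=
  l.foldl (fun s x => some (pvComb s x)) suf

theorem pvCombFold_some (l : List Int) : ∀ a : Int, pvCombFold (some a) l = some (l.foldl max a) := by
  induction l with
  | nil => intro a; rfl
  | cons x t ih => intro a; simpa [pvCombFold, pvComb] using ih (max a x)

theorem pvCombFold_none_cons (h : Int) (t : List Int) :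
    pvCombFold none (h :: t) = some (t.foldl max h) := by
  simpa [pvCombFold, pvComb] using pvCombFold_some t h

theorem foldl_max_of_all_le (l : List Int) : ∀ a : Int, (∀ y ∈ l, y ≤ a) → l.foldl max a = a := by
  induction l with
  | nil => intro a _; rfl
  | cons x t ih =>
    intro a h
    have hx : x ≤ a := h x (by simp)
    have : max a x = a := max_eq_left hx
    simpa [this] using ih a (fun y hy => h y (by simp [hy]))

-- max over l ++ [z] equals B's final pvComb step
theorem max?_append_singleton_eq (l : List Int) (z : Int) :
    PySem.List.max? (l ++ [z]) (fun y => y) = some (pvComb (pvCombFold none l) z) := by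
  cases l with
  | nil => simp [PySem.List.max?_id_cons, pvCombFold, pvComb]
  | cons h t =>
    rw [List.cons_append, PySem.List.max?_id_cons, pvCombFold_none_cons]
    simp [pvComb, List.foldl_append]

-- no new record: the scan keeps cur and folds everything into suf
theorem pvScan_all_le (l : List Int) : ∀ (cur : Int) (suf : Option Int), (∀ y ∈ l, y ≤ cur) →
    pvScan l cur suf = (cur, pvCombFold suf l) := by
  induction l with
  | nil => intro cur suf _; rfl
  | cons x t ih =>
    intro cur suf h
    have hx : x ≤ cur := h x (by simp)
    have : ¬ cur < x := not_lt.mpr hx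
    simp only [pvScan, this, if_false]
    simpa [pvCombFold] using ih cur (some (pvComb suf x)) (fun y hy => h y (by simp [hy]))

-- a later record exists: the incoming suf is irrelevant
theorem pvScan_erase (l : List Int) : ∀ (cur : Int) (suf : Option Int), (∃ y ∈ l, cur < y) →
    pvScan l cur suf = pvScan l cur none := by
  induction l with
  | nil => intro cur suf h; rcases h with ⟨y, hy, _⟩; simp at hy
  | cons x t ih =>
    intro cur suf h
    by_cases hx : cur < x
    · simp [pvScan, hx]
    · have hx' : x ≤ cur := not_lt.mp hx
      rcases h with ⟨y, hy, hcy⟩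
      have hyt : y ∈ t := by
        rcases List.mem_cons.mp hy with rfl | h'
        · exact absurd hcy hx
        · exact h'
      simp only [pvScan, hx, if_false]
      rw [ih cur (some (pvComb suf x)) ⟨y, hyt, hcy⟩, ih cur (some (pvComb none x)) ⟨y, hyt, hcy⟩]

-- the scan's cur is max(cur :: l); its suf is the fold of what follows the first index of that max
theorem pvScan_spec (l : List Int) : ∀ cur : Int, ∃ i : Nat,
    PySem.List.index? (cur :: l) (l.foldl max cur) = some i ∧
    pvScan l cur none = (l.foldl max cur, pvCombFold none (l.drop i)) := by
  induction l with
  | nil =>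
    intro cur
    exact ⟨0, by simp, by simp [pvScan, pvCombFold]⟩
  | cons x t ih =>
    intro cur
    by_cases hx : cur < x
    · -- record at x
      obtain ⟨i', hidx, hscan⟩ := ih x
      have hM : (x :: t).foldl max cur = t.foldl max x := by
        simp [List.foldl_cons, max_eq_right (le_of_lt hx)]
      have hcurne : cur ≠ t.foldl max x := by
        have := (PySem.List.le_foldl_max t x).1
        omega
      refine ⟨i' + 1, ?_, ?_⟩
      · rw [hM, PySem.List.index?_cons_of_ne _ hcurne, hidx]; rfl
      · simp only [pvScan, hx, if_true, hM, List.drop_succ_cons]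
        exact hscan
    · have hx' : x ≤ cur := not_lt.mp hx
      have hM : (x :: t).foldl max cur = t.foldl max cur := by
        simp [List.foldl_cons, max_eq_left hx']
      by_cases hall : ∀ y ∈ t, y ≤ cur
      · -- everything ≤ cur: max is cur, index 0
        have hfold : t.foldl max cur = cur := foldl_max_of_all_le t cur hall
        refine ⟨0, ?_, ?_⟩
        · rw [hM, hfold]; exact PySem.List.index?_cons_self _ _
        · simp only [pvScan, hx, if_false, List.drop_zero]
          rw [pvScan_all_le t cur (some (pvComb none x)) hall, hM, hfold]
          simp [pvCombFold]
      · -- a record lies in t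
        obtain ⟨y, hyt, hcy⟩ : ∃ y ∈ t, cur < y := by simpa using hall
        obtain ⟨i'', hidx, hscan⟩ := ih cur
        have hMc : cur < t.foldl max cur := lt_of_lt_of_le hcy ((PySem.List.le_foldl_max t cur).2 y hyt)
        have hcurne : cur ≠ t.foldl max cur := ne_of_lt hMc
        obtain ⟨j, hj1, hj2⟩ : ∃ j, PySem.List.index? t (t.foldl max cur) = some j ∧ i'' = j + 1 := by
          rw [PySem.List.index?_cons_of_ne _ hcurne] at hidx
          cases hjj : PySem.List.index? t (t.foldl max cur) with
          | none => rw [hjj] at hidx; simp at hidx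
          | some j => rw [hjj] at hidx; simp at hidx; exact ⟨j, rfl, hidx.symm⟩
        have hxne : x ≠ t.foldl max cur := by omega
        refine ⟨i'' + 1, ?_, ?_⟩
        · rw [hM, PySem.List.index?_cons_of_ne _ hcurne, PySem.List.index?_cons_of_ne _ hxne,
            hj1]
          simp [hj2]
        · simp only [pvScan, hx, if_false, hM, List.drop_succ_cons]
          rw [pvScan_erase t cur (some (pvComb none x)) ⟨y, hyt, hcy⟩]
          exact hscan

theorem slice_one_neg_one (c z : Int) (mid : List Int) :
    PySem.List.slice ((c :: mid) ++ [z]) (some 1) (some (-1)) = mid := by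
  simp [PySem.List.slice, PySem.List.clampIdx]
  rw [if_neg (by omega : ¬((mid.length : Int) + 1 < 0))]
  simp

-- per-bank agreement of the two loop bodies
theorem bank_step_eq (bank : List Int) (hlen : 2 ≤ bank.length) (total : Int) :
    (match PySem.List.max? (PySem.List.slice bank none (some (-1))) (fun y => y) with
      | none => total
      | some m =>
        match PySem.List.index? bank m with
        | none => total
        | some i =>
          match PySem.List.max? (PySem.List.slice bank (some ((i : Int) + 1)) none) (fun y => y) with
          | none => total
          | some a => total + m * 10 + a) =
    (match PySem.List.pyGet? bank 0, PySem.List.pyGet? bank (-1) with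
      | some c0, some z =>
        let p := pvScan (PySem.List.slice bank (some 1) (some (-1))) c0 none
        total + p.1 * 10 + pvComb p.2 z
      | _, _ => total) := by
  -- decompose bank = (c :: mid) ++ [z]
  obtain ⟨l, z, rfl⟩ : ∃ l z, bank = l ++ [z] := by
    rcases List.eq_nil_or_concat bank with h | ⟨l, z, h⟩
    · subst h; simp at hlen
    · exact ⟨l, z, by simpa [List.concat_eq_append] using h⟩
  obtain ⟨c, mid, rfl⟩ : ∃ c mid, l = c :: mid := by
    cases l with
    | nil => simp at hlen
    | cons c mid => exact ⟨c, mid, rfl⟩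
  obtain ⟨i, hidx, hscan⟩ := pvScan_spec mid c
  have hmem : mid.foldl max c ∈ c :: mid := by
    rcases PySem.List.foldl_max_mem mid c with h | h
    · rw [h]; simp
    · simp [h]
  have hi_le : i ≤ mid.length := by
    obtain ⟨hk, -, -⟩ := PySem.List.getElem_of_index?_eq_some hidx
    simp at hk
    omega
  -- A side facts
  have hA1 : PySem.List.slice ((c :: mid) ++ [z]) none (some (-1)) = c :: mid := by
    rw [PySem.List.slice_to_neg_one, List.dropLast_concat]
  have hA2 : PySem.List.index? ((c :: mid) ++ [z]) (mid.foldl max c) = some i := by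
    rw [PySem.List.index?_append_of_mem [z] hmem, hidx]
  have hdrop : ((c :: mid) ++ [z]).drop (((i : Int) + 1)).toNat = mid.drop i ++ [z] := by
    have h1 : (((i : Int) + 1)).toNat = i + 1 := by omega
    rw [h1, List.drop_append_of_le_length (by simp; omega), List.drop_succ_cons]
  have hA3 : PySem.List.slice ((c :: mid) ++ [z]) (some ((i : Int) + 1)) none = mid.drop i ++ [z] := by
    rw [PySem.List.slice_from _ (by omega : (0:Int) ≤ (i : Int) + 1), hdrop]
  -- B side facts
  have hget0 : PySem.List.pyGet? ((c :: mid) ++ [z]) 0 = some c := by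
    simp [PySem.List.pyGet?_zero]
  simp only [hA1, PySem.List.max?_id_cons, hA2, hA3, max?_append_singleton_eq,
    PySem.List.pyGet?_neg_one_append_singleton, hget0, slice_one_neg_one, hscan]

theorem fold_eq (banks : List (List Int)) (hpre : ∀ b ∈ banks, 2 ≤ b.length) : ∀ t : Int,
    banks.foldl (fun total bank =>
      match PySem.List.max? (PySem.List.slice bank none (some (-1))) (fun y => y) with
      | none => total
      | some m =>
        match PySem.List.index? bank m with
        | none => total
        | some i =>
          match PySem.List.max? (PySem.List.slice bank (some ((i : Int) + 1)) none) (fun y => y) with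
          | none => total
          | some a => total + m * 10 + a) t =
    banks.foldl (fun total bank =>
      match PySem.List.pyGet? bank 0, PySem.List.pyGet? bank (-1) with
      | some c0, some z =>
        let p := pvScan (PySem.List.slice bank (some 1) (some (-1))) c0 none
        total + p.1 * 10 + pvComb p.2 z
      | _, _ => total) t := by
  induction banks with
  | nil => intro t; rfl
  | cons bank rest ih =>
    intro t
    simp only [List.foldl_cons]
    rw [bank_step_eq bank (hpre bank (by simp)) t]
    exact ih (fun b hb => hpre b (by simp [hb])) _

-- ===== VERDICT (by name: the statement is the Claim_ definition above) =====
theorem part_one_spec : Claim_equal_part_one := by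
  intro banks _ hpre
  exact fold_eq banks hpre 0
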